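-- pv_equiv track=rewrite | github.com/GabrielMoraisReis/Jogo_de_palavras | tratamento_entrada.py | trata_entrada
-- ===== SOURCE A (Python) =====
-- import collections
--
-- def trata_entrada(letras_rodada, dicionario_pontuacao):
--     '''
--     Recebe como entrada todas as letras inseridas pelo usuário e o dicionário de letras que pontuam. Transforma
--     todos as letras inseridas pelo usuário em letras minúsculas e realiza as operações necessárias para retornar três valores:
--     letras_validas: dicionário que tem como chaves os caracteres que podem compor uma palavra do banco de palavras e como
--                    valor o número de vezes que esses caracteres foram inseridos pelo usuário;
--     letras_nao_usadas: lista de caracteres inseridos pelo usuário que não podem compor uma palavra do banco;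
--     num_letras_validas: número total de caracteres inseridos pelo usuário que podem compor uma palavra do banco de palavras.
--     '''
--
--     letras_validas = str.lower(letras_rodada)
--     letras_nao_usadas = list()
--     for char in letras_validas:
--         if char not in dicionario_pontuacao.keys():
--             letras_validas = letras_validas.replace(char, "")
--             letras_nao_usadas.append(char)      #Caracteres inválidos são salvos para serem exibidos no final.
--     num_letras_validas = len(letras_validas)     #Esse valor será utilizado posteriormente para o calculo da palavra possível de maior pontuação
--     letras_validas = dict(collections.Counter(letras_validas))
--     return letras_validas, letras_nao_usadas, num_letras_validas
-- ===== SOURCE B (Python) =====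
-- def trata_entrada(letras_rodada, dicionario_pontuacao):
--     '''Single pass over the lowercased input: classify each character once,
--     counting valid ones in a dict and collecting invalid ones, instead of
--     repeatedly rebuilding the string with str.replace and a final Counter.'''
--     letras_validas = {}
--     letras_nao_usadas = []
--     num_letras_validas = 0
--     for char in letras_rodada.lower():
--         if char in dicionario_pontuacao:
--             letras_validas[char] = letras_validas.get(char, 0) + 1
--             num_letras_validas += 1
--         else:
--             letras_nao_usadas.append(char)
--     return letras_validas, letras_nao_usadas, num_letras_validas
-- ===== Notes on version B (the rewrite author's own statement) =====
-- stated objective: faster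
-- what changed: Replaces A's loop that rebuilds the string with str.replace on every invalid character plus a final Counter pass by one linear pass that classifies each lowercased character once, counting valid ones in a dict and appending invalid ones to the list.
import Mathlib
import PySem

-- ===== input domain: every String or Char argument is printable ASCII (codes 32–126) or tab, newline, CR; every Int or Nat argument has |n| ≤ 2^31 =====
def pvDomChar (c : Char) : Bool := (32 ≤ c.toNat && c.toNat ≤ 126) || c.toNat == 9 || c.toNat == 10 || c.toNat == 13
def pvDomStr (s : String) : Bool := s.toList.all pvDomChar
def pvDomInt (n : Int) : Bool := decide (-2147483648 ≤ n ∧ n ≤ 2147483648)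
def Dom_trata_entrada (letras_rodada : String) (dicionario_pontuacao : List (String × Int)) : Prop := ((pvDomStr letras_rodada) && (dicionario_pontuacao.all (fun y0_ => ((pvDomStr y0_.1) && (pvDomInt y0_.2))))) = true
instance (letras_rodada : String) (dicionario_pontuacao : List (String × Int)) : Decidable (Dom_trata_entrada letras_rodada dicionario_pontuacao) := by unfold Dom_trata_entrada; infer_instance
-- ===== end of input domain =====

-- B does one linear pass over the lowercased input classifying each character once,
-- instead of A's loop that rebuilds the string with str.replace per invalid character
-- plus a final Counter pass (return-value equivalence; neither mutates its arguments).

-- ===== PORT A =====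
def trata_entrada (letras_rodada : String) (dicionario_pontuacao : List (String × Int)) : (List (String × Int)) × List String × Int :=
  let d : PySem.Dict String Int := PySem.Dict.mk dicionario_pontuacao
  let lowered : List Char := PySem.Chars.lower letras_rodada.toList
  -- 'for char in letras_validas' iterates the string as it was when the loop started
  let st := lowered.foldl
    (fun (st : List Char × List String) char =>
      if d.contains (String.ofList [char]) then st
      else (PySem.Chars.replace st.1 [char] [], st.2 ++ [String.ofList [char]]))
    (lowered, [])
  ((PySem.Dict.counter (st.1.map (fun c => String.ofList [c]))).items, st.2, (st.1.length : Int))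

-- ===== PORT B =====
def trata_entrada_alt (letras_rodada : String) (dicionario_pontuacao : List (String × Int)) : (List (String × Int)) × List String × Int :=
  let d : PySem.Dict String Int := PySem.Dict.mk dicionario_pontuacao
  let st := (PySem.Chars.lower letras_rodada.toList).foldl
    (fun (st : PySem.Dict String Int × List String × Int) char =>
      if d.contains (String.ofList [char]) then
        (st.1.insert (String.ofList [char]) (st.1.getD (String.ofList [char]) 0 + 1), st.2.1, st.2.2 + 1)
      else
        (st.1, st.2.1 ++ [String.ofList [char]], st.2.2))
    (PySem.Dict.empty, [], 0)
  (st.1.items, st.2.1, st.2.2)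

-- ===== PRECONDITION & SPEC =====
def Spec_trata_entrada (letras_rodada : String) (dicionario_pontuacao : List (String × Int)) (out : (List (String × Int)) × List String × Int) : Prop := out = trata_entrada_alt letras_rodada dicionario_pontuacao
instance (letras_rodada : String) (dicionario_pontuacao : List (String × Int)) (out : (List (String × Int)) × List String × Int) : Decidable (Spec_trata_entrada letras_rodada dicionario_pontuacao out) := by unfold Spec_trata_entrada; infer_instance

-- ===== CLAIM (what is proved, stated in full; the proofs are below) =====
def Claim_equal_trata_entrada : Prop := ∀ (letras_rodada : String) (dicionario_pontuacao : List (String × Int)), Dom_trata_entrada letras_rodada dicionario_pontuacao → Spec_trata_entrada letras_rodada dicionario_pontuacao (trata_entrada letras_rodada dicionario_pontuacao)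

-- ===== LEMMAS AND PROOFS =====

-- str.replace(c, "") on a 1-character pattern is a filter
theorem replace_single_go (x : Char) (l : List Char) (fuel : Nat) (acc : List Char)
    (h : l.length ≤ fuel) :
    PySem.Chars.replace.go [x] [] fuel l acc = acc.reverse ++ l.filter (fun c => c != x) := by
  induction l generalizing fuel acc with
  | nil => cases fuel <;> simp [PySem.Chars.replace.go]
  | cons c t ih =>
    cases fuel with
    | zero => simp at h
    | succ f =>
      rw [show PySem.Chars.replace.go [x] [] (f + 1) (c :: t) acc
          = if [x].isPrefixOf (c :: t) then
              PySem.Chars.replace.go [x] [] f (List.drop [x].length (c :: t)) ([].reverse ++ acc)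
            else PySem.Chars.replace.go [x] [] f t (c :: acc) from rfl]
      have hf : t.length ≤ f := Nat.le_of_succ_le_succ (by simpa using h)
      by_cases hc : x = c
      · subst hc
        simp only [List.isPrefixOf, BEq.rfl, Bool.true_and, if_true,
          List.length_cons, List.length_nil, Nat.zero_add, List.drop_succ_cons, List.drop_zero,
          List.reverse_nil, List.nil_append]
        rw [ih f acc hf]
        simp
      · have hbe : (x == c) = false := by simpa using hc
        simp only [List.isPrefixOf, hbe, Bool.false_and, Bool.false_eq_true, if_false]
        rw [ih f (c :: acc) hf]
        have hne : (c != x) = true := by simpa using fun h' => hc h'.symm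
        simp [hne]

theorem replace_single (a : List Char) (x : Char) :
    PySem.Chars.replace a [x] [] = a.filter (fun c => c != x) := by
  rw [PySem.Chars.replace]
  simp only [List.isEmpty_cons, Bool.false_eq_true, if_false]
  simpa using replace_single_go x a a.length [] (le_refl _)

-- A's replace-loop leaves exactly the characters passing the valid test
theorem replace_loop_filter (p : Char → Bool) (l a : List Char)
    (h : ∀ c ∈ a, p c = false → c ∈ l) :
    l.foldl (fun cur c => if p c then cur else PySem.Chars.replace cur [c] []) a
      = a.filter p := by
  induction l generalizing a with
  | nil =>
    simp only [List.foldl_nil]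
    rw [List.filter_eq_self.mpr]
    intro c hc
    by_cases hp : p c = true
    · exact hp
    · exact absurd (h c hc (by simpa using hp)) (by simp)
  | cons x t ih =>
    simp only [List.foldl_cons]
    by_cases hx : p x = true
    · rw [if_pos hx, ih a]
      intro c hc hpc
      rcases List.mem_cons.mp (h c hc hpc) with h' | h'
      · exact absurd hpc (by rw [h', hx]; simp)
      · exact h'
    · have hx' : p x = false := by simpa using hx
      rw [if_neg hx, replace_single]
      rw [ih (a.filter (fun c => c != x))]
      · rw [List.filter_filter]
        apply List.filter_congr
        intro c _
        by_cases hpc : p c = true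
        · have : (c != x) = true := by
            simp only [bne_iff_ne, ne_eq]
            intro he; rw [he, hx'] at hpc; exact Bool.false_ne_true hpc
          simp [hpc, this]
        · simp [show p c = false by simpa using hpc]
      · intro c hc hpc
        rw [List.mem_filter] at hc
        rcases List.mem_cons.mp (h c hc.1 hpc) with h' | h'
        · exact absurd hc.2 (by simp [h'])
        · exact h'

-- A's whole loop, split into its two independent accumulators
theorem loopA (p : Char → Bool) (F : Char → String) (cs : List Char) :
    cs.foldl
      (fun (st : List Char × List String) c =>
        if p c then st else (PySem.Chars.replace st.1 [c] [], st.2 ++ [F c]))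
      (cs, [])
      = (cs.filter p, (cs.filter (fun c => !p c)).map F) := by
  have hfun : (fun (st : List Char × List String) c =>
        if p c then st else (PySem.Chars.replace st.1 [c] [], st.2 ++ [F c]))
      = (fun (st : List Char × List String) c =>
        (if p c then st.1 else PySem.Chars.replace st.1 [c] [],
         if p c then st.2 else st.2 ++ [F c])) := by
    funext st c; by_cases h : p c <;> simp [h]
  rw [hfun, PySem.List.foldl_prod_mk
    (f := fun cur c => if p c then cur else PySem.Chars.replace cur [c] [])
    (g := fun nao c => if p c then nao else nao ++ [F c])]
  simp only [Prod.mk.injEq]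
  refine ⟨replace_loop_filter p cs cs (fun c hc _ => hc), ?_⟩
  have hg : (fun (nao : List String) c => if p c then nao else nao ++ [F c])
      = (fun (nao : List String) c => if !p c then nao ++ [F c] else nao) := by
    funext nao c; by_cases h : p c <;> simp [h]
  rw [hg, PySem.List.foldl_append_if (fun c => !p c) F]
  simp

-- B's whole loop, split into its three independent accumulators
theorem loopB (p : Char → Bool) (F : Char → String) (cs : List Char) :
    cs.foldl
      (fun (st : PySem.Dict String Int × List String × Int) c =>
        if p c then (st.1.insert (F c) (st.1.getD (F c) 0 + 1), st.2.1, st.2.2 + 1)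
        else (st.1, st.2.1 ++ [F c], st.2.2))
      (PySem.Dict.empty, [], 0)
      = (PySem.Dict.counter ((cs.filter p).map F),
         (cs.filter (fun c => !p c)).map F,
         ((cs.countP p : Nat) : Int)) := by
  have hfun : (fun (st : PySem.Dict String Int × List String × Int) c =>
        if p c then (st.1.insert (F c) (st.1.getD (F c) 0 + 1), st.2.1, st.2.2 + 1)
        else (st.1, st.2.1 ++ [F c], st.2.2))
      = (fun (st : PySem.Dict String Int × List String × Int) c =>
        (if p c then st.1.insert (F c) (st.1.getD (F c) 0 + 1) else st.1,
         if p c then st.2.1 else st.2.1 ++ [F c],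
         if p c then st.2.2 + 1 else st.2.2)) := by
    funext st c; by_cases h : p c <;> simp [h]
  rw [hfun, PySem.List.foldl_prod_mk
    (f := fun (dd : PySem.Dict String Int) c =>
        if p c then dd.insert (F c) (dd.getD (F c) 0 + 1) else dd)
    (g := fun (pr : List String × Int) c =>
        (if p c then pr.1 else pr.1 ++ [F c], if p c then pr.2 + 1 else pr.2))]
  rw [PySem.List.foldl_prod_mk
    (f := fun (nao : List String) c => if p c then nao else nao ++ [F c])
    (g := fun (n : Int) c => if p c then n + 1 else n)]
  simp only [Prod.mk.injEq]
  refine ⟨?_, ?_, ?_⟩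
  · rw [PySem.List.foldl_if_eq_foldl_filter p
      (fun (dd : PySem.Dict String Int) c => dd.insert (F c) (dd.getD (F c) 0 + 1))]
    rw [← PySem.Dict.foldl_insert_getD_add_one_eq_counter, List.foldl_map]
  · have hg : (fun (nao : List String) c => if p c then nao else nao ++ [F c])
        = (fun (nao : List String) c => if !p c then nao ++ [F c] else nao) := by
      funext nao c; by_cases h : p c <;> simp [h]
    rw [hg, PySem.List.foldl_append_if (fun c => !p c) F]
    simp
  · rw [PySem.List.foldl_if_add_one]
    simp

theorem trata_entrada_spec : Claim_equal_trata_entrada := by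
  intro letras_rodada dicionario_pontuacao _
  unfold Spec_trata_entrada trata_entrada trata_entrada_alt
  dsimp only
  rw [loopA (fun c => (PySem.Dict.mk dicionario_pontuacao).contains (String.ofList [c]))
        (fun c => String.ofList [c]),
      loopB (fun c => (PySem.Dict.mk dicionario_pontuacao).contains (String.ofList [c]))
        (fun c => String.ofList [c])]
  simp [List.countP_eq_length_filter]
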